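-- pv_equiv track=rewrite | github.com/prathammehta/interview-prep | IsVotingPossible.py | can_we_vote
-- ===== SOURCE A (Python) =====
-- def can_we_vote(a, index, t1, t2):
-- 	if t1 < 0 or t2 < 0:
-- 		return 0
-- 	if t1 <= 0 and t2 <= 0 and index < len(a):
-- 		return 0
-- 	if index >= len(a):
-- 		return 1
-- 	if t1 == 0:
-- 		return can_we_vote(a, index+1, 0, t2-a[index])
-- 	if t2 == 0:
-- 		return can_we_vote(a, index+1, t1-a[index], 0)
--
-- 	return max(can_we_vote(a, index+1, t1 - a[index], t2), can_we_vote(a, index+1, t1, t2 - a[index]))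
-- ===== SOURCE B (Python) =====
-- def can_we_vote(a, index, t1, t2):
--     if t1 < 0 or t2 < 0:
--         return 0
--     n = len(a)
--     if index < n and t1 == 0 and t2 == 0:
--         return 0
--     states = {(t1, t2)}
--     i = index
--     while i < n and states:
--         x = a[i]
--         nxt = set()
--         for (u, v) in states:
--             if u == 0:
--                 cands = ((0, v - x),)
--             elif v == 0:
--                 cands = ((u - x, 0),)
--             else:
--                 cands = ((u - x, v), (u, v - x))
--             for (p, q) in cands:
--                 if p >= 0 and q >= 0 and not (p == 0 and q == 0 and i + 1 < n):
--                     nxt.add((p, q))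
--         states = nxt
--         i += 1
--     return 1 if states else 0
-- ===== Notes on version B (the rewrite author's own statement) =====
-- stated objective: faster
-- what changed: Replaces the exponential branching recursion by an iterative forward search that keeps one deduplicated set of reachable (t1,t2) states per index (the memoization effect of a DP keyed on (index,t1,t2)), returning 1 iff any state survives to the end.
import Mathlib
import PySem

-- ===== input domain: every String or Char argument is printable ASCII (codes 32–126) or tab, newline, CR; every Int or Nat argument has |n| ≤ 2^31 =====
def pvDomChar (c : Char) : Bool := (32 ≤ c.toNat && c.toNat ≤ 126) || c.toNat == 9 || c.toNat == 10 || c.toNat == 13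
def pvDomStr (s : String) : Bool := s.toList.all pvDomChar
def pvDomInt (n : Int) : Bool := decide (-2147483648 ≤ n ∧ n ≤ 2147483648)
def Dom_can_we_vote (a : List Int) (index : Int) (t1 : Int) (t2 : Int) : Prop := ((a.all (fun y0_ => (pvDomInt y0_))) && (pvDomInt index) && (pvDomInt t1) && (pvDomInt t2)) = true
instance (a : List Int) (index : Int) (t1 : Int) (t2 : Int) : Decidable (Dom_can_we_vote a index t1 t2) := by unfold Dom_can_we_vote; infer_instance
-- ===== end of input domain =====

-- B replaces A's exponential branching recursion by an iterative per-index set of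
-- reachable (t1,t2) states (deduplicated, i.e. the memoization effect of a DP).

-- ===== PORT A =====
def can_we_vote (a : List Int) (index : Int) (t1 : Int) (t2 : Int) : Int :=
  if t1 < 0 ∨ t2 < 0 then 0
  else if t1 ≤ 0 ∧ t2 ≤ 0 ∧ index < (a.length : Int) then 0
  else if index ≥ (a.length : Int) then 1
  else if t1 = 0 then can_we_vote a (index + 1) 0 (t2 - PySem.List.pyGetD a index 0)
  else if t2 = 0 then can_we_vote a (index + 1) (t1 - PySem.List.pyGetD a index 0) 0
  else max (can_we_vote a (index + 1) (t1 - PySem.List.pyGetD a index 0) t2)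
           (can_we_vote a (index + 1) t1 (t2 - PySem.List.pyGetD a index 0))
termination_by ((a.length : Int) - index).toNat
decreasing_by all_goals omega

-- ===== PORT B =====
-- candidate successor states of one state (u, v) on list element x
def pvCands (u v x : Int) : List (Int × Int) :=
  if u = 0 then [(0, v - x)]
  else if v = 0 then [(u - x, 0)]
  else [(u - x, v), (u, v - x)]

-- one loop iteration: build the set of surviving successor states (i1 = i + 1)
def pvStep (n i1 x : Int) (states : PySem.Set (Int × Int)) : PySem.Set (Int × Int) :=
  states.foldl (fun acc s =>
    (pvCands s.1 s.2 x).foldl (fun acc2 pq =>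
      if 0 ≤ pq.1 ∧ 0 ≤ pq.2 ∧ ¬(pq.1 = 0 ∧ pq.2 = 0 ∧ i1 < n) then PySem.Set.add acc2 pq
      else acc2) acc)
    PySem.Set.empty

def pvLoop (a : List Int) (n : Int) (i : Int) (states : PySem.Set (Int × Int)) : Int :=
  if h : i < n ∧ states ≠ [] then
    pvLoop a n (i + 1) (pvStep n (i + 1) (PySem.List.pyGetD a i 0) states)
  else if states ≠ [] then 1 else 0
termination_by (n - i).toNat
decreasing_by omega

def can_we_vote_alt (a : List Int) (index : Int) (t1 : Int) (t2 : Int) : Int :=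
  if t1 < 0 ∨ t2 < 0 then 0
  else if index < (a.length : Int) ∧ t1 = 0 ∧ t2 = 0 then 0
  else pvLoop a (a.length : Int) index (PySem.Set.ofList [(t1, t2)])

-- ===== PRECONDITION & SPEC =====
-- Pre_ excludes exactly the inputs on which the Python A raises IndexError (a[index]
-- with index < -len(a) reached because no early-return guard fires); B raises there too.
def Pre_can_we_vote (a : List Int) (index : Int) (t1 : Int) (t2 : Int) : Prop :=
  -(a.length : Int) ≤ index ∨ t1 < 0 ∨ t2 < 0 ∨ (t1 = 0 ∧ t2 = 0 ∧ index < (a.length : Int))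
instance (a : List Int) (index : Int) (t1 : Int) (t2 : Int) : Decidable (Pre_can_we_vote a index t1 t2) := by unfold Pre_can_we_vote; infer_instance

def pvWitness_can_we_vote : List Int × Int × Int × Int := ([1, 2], 0, 1, 2)

def Spec_can_we_vote (a : List Int) (index : Int) (t1 : Int) (t2 : Int) (out : Int) : Prop := out = can_we_vote_alt a index t1 t2
instance (a : List Int) (index : Int) (t1 : Int) (t2 : Int) (out : Int) : Decidable (Spec_can_we_vote a index t1 t2 out) := by unfold Spec_can_we_vote; infer_instance

-- ===== CLAIM (what is proved, stated in full; the proofs are below) =====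
def Claim_equal_can_we_vote : Prop := ∀ (a : List Int) (index : Int) (t1 : Int) (t2 : Int), Dom_can_we_vote a index t1 t2 → Pre_can_we_vote a index t1 t2 → Spec_can_we_vote a index t1 t2 (can_we_vote a index t1 t2)

-- ===== LEMMAS AND PROOFS =====

-- a state that survives B's filter at position i (w.r.t. list length n)
def pvOK (n i : Int) (s : Int × Int) : Prop :=
  0 ≤ s.1 ∧ 0 ≤ s.2 ∧ ¬(s.1 = 0 ∧ s.2 = 0 ∧ i < n)

lemma A01 (a : List Int) (i t1 t2 : Int) :
    can_we_vote a i t1 t2 = 0 ∨ can_we_vote a i t1 t2 = 1 := by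
  fun_induction can_we_vote a i t1 t2
  all_goals omega

lemma A_of_not_ok (a : List Int) (i u v : Int) (h : ¬ pvOK (a.length : Int) i (u, v)) :
    can_we_vote a i u v = 0 := by
  rw [can_we_vote]
  unfold pvOK at h
  dsimp only at h
  split_ifs with g1 g2 <;> first | rfl | (exfalso; omega)

lemma A_step (a : List Int) (i u v : Int) (hi : i < (a.length : Int))
    (hok : pvOK (a.length : Int) i (u, v)) :
    can_we_vote a i u v = 1 ↔
      ∃ pq ∈ pvCands u v (PySem.List.pyGetD a i 0),
        pvOK (a.length : Int) (i + 1) pq ∧ can_we_vote a (i + 1) pq.1 pq.2 = 1 := by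
  obtain ⟨h1, h2, h3⟩ := hok
  have aux : ∀ p q : Int, can_we_vote a (i + 1) p q = 1 →
      pvOK (a.length : Int) (i + 1) (p, q) := by
    intro p q hpq
    by_contra hno
    rw [A_of_not_ok a _ _ _ hno] at hpq
    exact absurd hpq (by decide)
  rw [can_we_vote]
  rw [if_neg (by omega), if_neg (by omega), if_neg (by omega)]
  by_cases hu : u = 0
  · simp only [pvCands, if_pos hu]
    subst hu
    constructor
    · intro h; exact ⟨(0, v - _), by simp, aux _ _ h, h⟩
    · rintro ⟨pq, hmem, _, hval⟩; simp at hmem; subst hmem; exact hval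
  · rw [if_neg hu]
    by_cases hv : v = 0
    · simp only [pvCands, if_neg hu, if_pos hv]
      subst hv
      constructor
      · intro h; exact ⟨(u - _, 0), by simp, aux _ _ h, h⟩
      · rintro ⟨pq, hmem, _, hval⟩; simp at hmem; subst hmem; exact hval
    · rw [if_neg hv]
      simp only [pvCands, if_neg hu, if_neg hv]
      constructor
      · intro h
        rcases A01 a (i+1) (u - PySem.List.pyGetD a i 0) v with h1' | h1' <;>
        rcases A01 a (i+1) u (v - PySem.List.pyGetD a i 0) with h2' | h2'
        · omega
        · exact ⟨(u, v - _), by simp, aux _ _ h2', h2'⟩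
        · exact ⟨(u - _, v), by simp, aux _ _ h1', h1'⟩
        · exact ⟨(u - _, v), by simp, aux _ _ h1', h1'⟩
      · rintro ⟨pq, hmem, _, hval⟩
        simp at hmem
        rcases hmem with h' | h' <;> subst h' <;> dsimp only at hval
        · have := A01 a (i+1) u (v - PySem.List.pyGetD a i 0); omega
        · have := A01 a (i+1) (u - PySem.List.pyGetD a i 0) v; omega

lemma mem_inner (n i1 : Int) (pq : Int × Int) (l : List (Int × Int)) (acc : PySem.Set (Int × Int)) :
    pq ∈ l.foldl (fun acc2 r =>
      if 0 ≤ r.1 ∧ 0 ≤ r.2 ∧ ¬(r.1 = 0 ∧ r.2 = 0 ∧ i1 < n) then PySem.Set.add acc2 r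
      else acc2) acc ↔ pq ∈ acc ∨ (pq ∈ l ∧ pvOK n i1 pq) := by
  induction l generalizing acc with
  | nil => simp
  | cons r rs ih =>
    rw [List.foldl_cons, ih]
    by_cases hc : 0 ≤ r.1 ∧ 0 ≤ r.2 ∧ ¬(r.1 = 0 ∧ r.2 = 0 ∧ i1 < n)
    · rw [if_pos hc]
      constructor
      · rintro (h | h)
        · rcases (PySem.Set.mem_add _ _ _).1 h with h' | h'
          · exact Or.inl h'
          · subst h'; exact Or.inr ⟨by simp, hc⟩
        · exact Or.inr ⟨List.mem_cons_of_mem _ h.1, h.2⟩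
      · rintro (h | ⟨hm, hok⟩)
        · exact Or.inl ((PySem.Set.mem_add _ _ _).2 (Or.inl h))
        · rcases List.mem_cons.1 hm with h' | h'
          · subst h'; exact Or.inl ((PySem.Set.mem_add _ _ _).2 (Or.inr rfl))
          · exact Or.inr ⟨h', hok⟩
    · rw [if_neg hc]
      constructor
      · rintro (h | h)
        · exact Or.inl h
        · exact Or.inr ⟨List.mem_cons_of_mem _ h.1, h.2⟩
      · rintro (h | ⟨hm, hok⟩)
        · exact Or.inl h
        · rcases List.mem_cons.1 hm with h' | h'
          · subst h'; exact absurd hok hc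
          · exact Or.inr ⟨h', hok⟩

lemma mem_outer (n i1 x : Int) (pq : Int × Int) (l : List (Int × Int)) (acc : PySem.Set (Int × Int)) :
    pq ∈ l.foldl (fun acc s =>
        (pvCands s.1 s.2 x).foldl (fun acc2 pq =>
          if 0 ≤ pq.1 ∧ 0 ≤ pq.2 ∧ ¬(pq.1 = 0 ∧ pq.2 = 0 ∧ i1 < n) then PySem.Set.add acc2 pq
          else acc2) acc) acc ↔
      pq ∈ acc ∨ ((∃ s ∈ l, pq ∈ pvCands s.1 s.2 x) ∧ pvOK n i1 pq) := by
  induction l generalizing acc with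
  | nil => simp
  | cons s ss ih =>
    rw [List.foldl_cons, ih, mem_inner]
    constructor
    · rintro ((h | ⟨hm, hok⟩) | ⟨⟨s', hs', hm⟩, hok⟩)
      · exact Or.inl h
      · exact Or.inr ⟨⟨s, List.mem_cons_self, hm⟩, hok⟩
      · exact Or.inr ⟨⟨s', List.mem_cons_of_mem _ hs', hm⟩, hok⟩
    · rintro (h | ⟨⟨s', hs', hm⟩, hok⟩)
      · exact Or.inl (Or.inl h)
      · rcases List.mem_cons.1 hs' with h' | h'
        · subst h'; exact Or.inl (Or.inr ⟨hm, hok⟩)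
        · exact Or.inr ⟨⟨s', h', hm⟩, hok⟩

lemma mem_step (n i1 x : Int) (pq : Int × Int) (S : PySem.Set (Int × Int)) :
    pq ∈ pvStep n i1 x S ↔ (∃ s ∈ S, pq ∈ pvCands s.1 s.2 x) ∧ pvOK n i1 pq := by
  unfold pvStep
  rw [mem_outer]
  simp [PySem.Set.empty]

lemma loop_spec (a : List Int) : ∀ (k : Nat) (i : Int) (S : PySem.Set (Int × Int)),
    (((a.length : Int) - i).toNat = k) →
    (∀ s ∈ S, pvOK (a.length : Int) i s) →
    pvLoop a (a.length : Int) i S =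
      if ∃ s ∈ S, can_we_vote a i s.1 s.2 = 1 then 1 else 0 := by
  intro k
  induction k using Nat.strong_induction_on with
  | _ k ih =>
    intro i S hk hok
    rw [pvLoop]
    by_cases hcond : i < (a.length : Int) ∧ S ≠ []
    · rw [dif_pos hcond]
      rw [ih (((a.length : Int) - (i + 1)).toNat) (by omega) (i + 1) _ rfl
          (by intro s hs; exact ((mem_step _ _ _ _ _).1 hs).2)]
      congr 1
      simp only [eq_iff_iff]
      constructor
      · rintro ⟨s', hs', hval⟩
        obtain ⟨⟨s, hsS, hcand⟩, hok'⟩ := (mem_step _ _ _ _ _).1 hs'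
        refine ⟨s, hsS, ?_⟩
        rw [A_step a i s.1 s.2 hcond.1 (hok s hsS)]
        exact ⟨s', hcand, hok', hval⟩
      · rintro ⟨s, hsS, hval⟩
        rw [A_step a i s.1 s.2 hcond.1 (hok s hsS)] at hval
        obtain ⟨pq, hcand, hok', hval'⟩ := hval
        exact ⟨pq, (mem_step _ _ _ _ _).2 ⟨⟨s, hsS, hcand⟩, hok'⟩, hval'⟩
    · rw [dif_neg hcond]
      by_cases hS : S = []
      · subst hS; simp
      · have hi : (a.length : Int) ≤ i := by
          by_contra h; exact hcond ⟨by omega, hS⟩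
        rw [if_pos hS]
        obtain ⟨s, hs⟩ := List.exists_mem_of_ne_nil S hS
        have h1 : can_we_vote a i s.1 s.2 = 1 := by
          obtain ⟨o1, o2, o3⟩ := hok s hs
          rw [can_we_vote]
          rw [if_neg (by omega), if_neg (by omega), if_pos (by omega)]
        rw [if_pos ⟨s, hs, h1⟩]

-- ===== VERDICT (by name: the statement is the Claim_ definition above) =====
theorem can_we_vote_spec : Claim_equal_can_we_vote := by
  intro a index t1 t2 _ _
  unfold Spec_can_we_vote can_we_vote_alt
  by_cases h1 : t1 < 0 ∨ t2 < 0
  · rw [if_pos h1, can_we_vote, if_pos h1]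
  · rw [if_neg h1]
    by_cases h2 : index < (a.length : Int) ∧ t1 = 0 ∧ t2 = 0
    · rw [if_pos h2, can_we_vote, if_neg h1, if_pos (by omega)]
    · rw [if_neg h2]
      have hset : PySem.Set.ofList [(t1, t2)] = [(t1, t2)] := rfl
      rw [hset, loop_spec a ((a.length : Int) - index).toNat index [(t1, t2)] rfl ?hok]
      case hok =>
        intro s hs
        simp at hs
        subst hs
        exact ⟨by omega, by omega, by intro h; exact h2 ⟨h.2.2, h.1, h.2.1⟩⟩
      rcases A01 a index t1 t2 with h | h
      · rw [h, if_neg]; rintro ⟨s, hs, hval⟩; rw [List.mem_singleton] at hs; subst hs; dsimp only at hval; omega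
      · rw [h, if_pos ⟨(t1, t2), List.mem_singleton.mpr rfl, h⟩]
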